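-- pv_equiv track=rewrite | github.com/RahmanTeamDevelopment/RefSeqDB | refseqdb/mapping.py | break_into_exons
-- ===== SOURCE A (Python) =====
-- def break_into_exons(cigar_list):
--     """Break cigar list to exons"""
--
--     exons = []
--     intron_lengths = []
--     e = []
--     for x in cigar_list:
--         if x[-1] == 'N':
--             exons.append(e)
--             intron_lengths.append(int(x[:-1]))
--             e = []
--         else:
--             e.append(x)
--     exons.append(e)
--
--     exon_lengths = []
--     for e in exons:
--         total = 0
--         for x in e:
--             if x[-1] in ['=', 'X', 'D']:
--                 total += int(x[:-1])
--         exon_lengths.append(total)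
--
--     exon_cigars = []
--     for e in exons:
--         exon_cigar = ''
--         for x in e:
--             exon_cigar += x
--         exon_cigars.append(exon_cigar)
--
--     return exon_lengths, intron_lengths, exon_cigars
-- ===== SOURCE B (Python) =====
-- def break_into_exons(cigar_list):
--     """Break cigar list to exons (single pass over the cigar tokens)."""
--     exon_lengths = []
--     intron_lengths = []
--     exon_cigars = []
--     cur_len = 0
--     cur_cigar = ''
--     for x in cigar_list:
--         if x[-1] == 'N':
--             exon_lengths.append(cur_len)
--             intron_lengths.append(int(x[:-1]))
--             exon_cigars.append(cur_cigar)
--             cur_len = 0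
--             cur_cigar = ''
--         else:
--             if x[-1] in ('=', 'X', 'D'):
--                 cur_len += int(x[:-1])
--             cur_cigar += x
--     exon_lengths.append(cur_len)
--     exon_cigars.append(cur_cigar)
--     return exon_lengths, intron_lengths, exon_cigars
-- ===== Notes on version B (the rewrite author's own statement) =====
-- stated objective: simpler
-- what changed: B computes all three result lists in one pass with running length/cigar accumulators, instead of A's building an intermediate list of exon token-lists and then rescanning it twice.
import Mathlib
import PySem

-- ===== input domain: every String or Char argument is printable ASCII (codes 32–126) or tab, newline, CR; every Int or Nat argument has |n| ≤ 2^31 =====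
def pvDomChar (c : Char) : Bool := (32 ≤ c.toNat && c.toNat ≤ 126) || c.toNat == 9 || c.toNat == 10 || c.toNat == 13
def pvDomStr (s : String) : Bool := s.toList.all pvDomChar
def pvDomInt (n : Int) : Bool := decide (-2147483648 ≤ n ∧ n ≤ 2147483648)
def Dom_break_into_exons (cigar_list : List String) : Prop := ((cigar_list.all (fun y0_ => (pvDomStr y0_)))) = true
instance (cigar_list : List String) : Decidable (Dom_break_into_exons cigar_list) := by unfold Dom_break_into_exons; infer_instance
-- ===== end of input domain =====

-- B computes all three result lists in one pass with running accumulators instead of A's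
-- intermediate list-of-exons plus two rescans (objective: simpler).


-- shared token helpers: x[-1] (Pre_ guarantees x ≠ "", so the default is never read)
def pvLast (x : String) : Char := x.toList.getLast?.getD ' '
-- int(x[:-1]); Pre_ guarantees the parse succeeds wherever either Python calls int()
def pvIntPrefix (x : String) : Int := (PySem.Int.ofStr? (String.mk x.toList.dropLast)).getD 0

-- ===== PORT A =====
-- first loop: split tokens into exon token-lists and intron lengths
def aStep (acc : List (List String) × List Int × List String) (x : String) :
    List (List String) × List Int × List String :=
  if pvLast x = 'N' then (acc.1 ++ [acc.2.2], acc.2.1 ++ [pvIntPrefix x], [])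
  else (acc.1, acc.2.1, acc.2.2 ++ [x])

def break_into_exons (cigar_list : List String) : List Int × List Int × List String :=
  let st := cigar_list.foldl aStep ([], [], [])
  let exons := st.1 ++ [st.2.2]
  let exon_lengths := exons.foldl (fun acc e =>
    acc ++ [e.foldl (fun total x =>
      if pvLast x = '=' ∨ pvLast x = 'X' ∨ pvLast x = 'D' then total + pvIntPrefix x
      else total) 0]) []
  let exon_cigars := exons.foldl (fun acc e =>
    acc ++ [e.foldl (fun s x => s ++ x) ""]) []
  (exon_lengths, st.2.1, exon_cigars)

-- ===== PORT B =====
-- one pass: state = (exon_lengths, intron_lengths, exon_cigars, cur_len, cur_cigar)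
def bStep (acc : List Int × List Int × List String × Int × String) (x : String) :
    List Int × List Int × List String × Int × String :=
  if pvLast x = 'N' then
    (acc.1 ++ [acc.2.2.2.1], acc.2.1 ++ [pvIntPrefix x], acc.2.2.1 ++ [acc.2.2.2.2], 0, "")
  else
    (acc.1, acc.2.1, acc.2.2.1,
     if pvLast x = '=' ∨ pvLast x = 'X' ∨ pvLast x = 'D' then acc.2.2.2.1 + pvIntPrefix x
     else acc.2.2.2.1,
     acc.2.2.2.2 ++ x)

def break_into_exons_alt (cigar_list : List String) : List Int × List Int × List String :=
  let st := cigar_list.foldl bStep ([], [], [], 0, "")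
  (st.1 ++ [st.2.2.2.1], st.2.1, st.2.2.1 ++ [st.2.2.2.2])

-- ===== PRECONDITION & SPEC =====
-- Pre_ excludes exactly the inputs where Python A raises: an empty token (IndexError on
-- x[-1]) or a token ending in N/=/X/D whose prefix int() cannot parse (ValueError).
def Pre_break_into_exons (cigar_list : List String) : Prop :=
  ∀ x ∈ cigar_list, x ≠ "" ∧
    ((pvLast x = 'N' ∨ pvLast x = '=' ∨ pvLast x = 'X' ∨ pvLast x = 'D') →
      (PySem.Int.ofStr? (String.mk x.toList.dropLast)).isSome = true)
instance (cigar_list : List String) : Decidable (Pre_break_into_exons cigar_list) := by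
  unfold Pre_break_into_exons; infer_instance

def pvWitness_break_into_exons : List String := ["3=", "100N", "2X", "5I"]

def Spec_break_into_exons (cigar_list : List String) (out : List Int × List Int × List String) : Prop := out = break_into_exons_alt cigar_list
instance (cigar_list : List String) (out : List Int × List Int × List String) : Decidable (Spec_break_into_exons cigar_list out) := by unfold Spec_break_into_exons; infer_instance

-- ===== CLAIM (what is proved, stated in full; the proofs are below) =====
def Claim_equal_break_into_exons : Prop := ∀ (cigar_list : List String), Dom_break_into_exons cigar_list → Pre_break_into_exons cigar_list → Spec_break_into_exons cigar_list (break_into_exons cigar_list)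

-- ===== LEMMAS AND PROOFS =====

-- A's per-exon length
def lenOf (e : List String) : Int :=
  e.foldl (fun total x =>
    if pvLast x = '=' ∨ pvLast x = 'X' ∨ pvLast x = 'D' then total + pvIntPrefix x
    else total) 0

-- A's per-exon cigar string
def catOf (e : List String) : String := e.foldl (fun s x => s ++ x) ""

lemma lenOf_snoc (e : List String) (x : String) :
    lenOf (e ++ [x]) =
      if pvLast x = '=' ∨ pvLast x = 'X' ∨ pvLast x = 'D' then lenOf e + pvIntPrefix x
      else lenOf e := by
  simp [lenOf, List.foldl_append]

lemma catOf_snoc (e : List String) (x : String) : catOf (e ++ [x]) = catOf e ++ x := by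
  simp [catOf, List.foldl_append]

-- A's rescan loops build the map of the exon list
lemma foldl_push {α β : Type} (f : α → β) :
    ∀ (l : List α) (acc : List β),
      l.foldl (fun acc e => acc ++ [f e]) acc = acc ++ l.map f := by
  intro l
  induction l with
  | nil => simp
  | cons y ys ih => intro acc; simp [List.foldl_cons, ih]

-- invariant: B's state is A's state viewed through lenOf/catOf
lemma loop_inv :
    ∀ (xs : List String) (exons : List (List String)) (ils : List Int) (e : List String),
      xs.foldl bStep (exons.map lenOf, ils, exons.map catOf, lenOf e, catOf e)
        = ((xs.foldl aStep (exons, ils, e)).1.map lenOf,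
           (xs.foldl aStep (exons, ils, e)).2.1,
           (xs.foldl aStep (exons, ils, e)).1.map catOf,
           lenOf (xs.foldl aStep (exons, ils, e)).2.2,
           catOf (xs.foldl aStep (exons, ils, e)).2.2) := by
  intro xs
  induction xs with
  | nil => intro exons ils e; rfl
  | cons x xs ih =>
    intro exons ils e
    by_cases h : pvLast x = 'N'
    · have hb : bStep (exons.map lenOf, ils, exons.map catOf, lenOf e, catOf e) x
          = ((exons ++ [e]).map lenOf, ils ++ [pvIntPrefix x],
             (exons ++ [e]).map catOf, lenOf ([] : List String), catOf ([] : List String)) := by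
        simp [bStep, h, lenOf, catOf]
      have ha : aStep (exons, ils, e) x = (exons ++ [e], ils ++ [pvIntPrefix x], ([] : List String)) := by
        simp [aStep, h]
      simp only [List.foldl_cons, hb, ha]
      exact ih (exons ++ [e]) (ils ++ [pvIntPrefix x]) []
    · have hb : bStep (exons.map lenOf, ils, exons.map catOf, lenOf e, catOf e) x
          = (exons.map lenOf, ils, exons.map catOf, lenOf (e ++ [x]), catOf (e ++ [x])) := by
        simp [bStep, h, lenOf_snoc, catOf_snoc]
      have ha : aStep (exons, ils, e) x = (exons, ils, e ++ [x]) := by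
        simp [aStep, h]
      simp only [List.foldl_cons, hb, ha]
      exact ih exons ils (e ++ [x])

-- ===== VERDICT (by name: the statement is the Claim_ definition above) =====
theorem break_into_exons_spec : Claim_equal_break_into_exons := by
  intro cigar_list _ _
  unfold Spec_break_into_exons break_into_exons break_into_exons_alt
  have h := loop_inv cigar_list [] [] []
  simp only [List.map_nil] at h
  have h0 : lenOf ([] : List String) = 0 := rfl
  have h1 : catOf ([] : List String) = "" := rfl
  rw [h0, h1] at h
  simp only [h, foldl_push, List.nil_append, List.map_append, List.map_cons, List.map_nil]
  rfl
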